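-- pv_equiv track=rewrite | github.com/SanJJJJOk/en_game | module1.py | gibrid_3_values_handler
-- ===== SOURCE A (Python) =====
-- def gibrid_3_values_handler(values):
--     union = []
--     first = values[0]
--     second = values[1]
--     for i in first:
--         for j in second:
--             if len(i)<4 and len(j)<4:
--                 continue
--             if i[-3:] == j[0:3]:
--                 if not j + '-' + i in union:
--                     union.append(i + '-' + j)
--             if i[0:3] == j[-3:]:
--                 if not i + '-' + j in union:
--                     union.append(j + '-' + i)
--     return union
-- ===== SOURCE B (Python) =====
-- def gibrid_3_values_handler(values):
--     first = values[0]
--     second = values[1]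
--     # index `second` once: by 3-char prefix and by 3-char suffix
--     by_pref = {}
--     by_suff = {}
--     for idx, j in enumerate(second):
--         by_pref.setdefault(j[0:3], []).append((idx, j))
--         by_suff.setdefault(j[-3:], []).append((idx, j))
--     union = []
--     seen = set()          # mirrors the contents of `union` for O(1) membership
--     for i in first:
--         l1 = by_pref.get(i[-3:], [])   # j's with i[-3:] == j[0:3]
--         l2 = by_suff.get(i[0:3], [])   # j's with i[0:3] == j[-3:]
--         a = b = 0
--         # merge the two match lists in `second`'s order (prefix-match action first on ties)
--         while a < len(l1) or b < len(l2):
--             if a < len(l1) and (b >= len(l2) or l1[a][0] <= l2[b][0]):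
--                 j = l1[a][1]; a += 1
--                 key, val = j + '-' + i, i + '-' + j
--             else:
--                 j = l2[b][1]; b += 1
--                 key, val = i + '-' + j, j + '-' + i
--             if len(i) < 4 and len(j) < 4:
--                 continue
--             if key not in seen:
--                 union.append(val)
--                 seen.add(val)
--     return union
-- ===== Notes on version B (the rewrite author's own statement) =====
-- stated objective: faster
-- what changed: B indexes `second` once by 3-char prefix and suffix into dicts, then for each word of `first` merges the two (index-ordered) match lists with two pointers instead of scanning all of `second`, and keeps a set mirror of `union` so the dedup membership test is O(1) instead of a scan of `union`.
import Mathlib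
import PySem

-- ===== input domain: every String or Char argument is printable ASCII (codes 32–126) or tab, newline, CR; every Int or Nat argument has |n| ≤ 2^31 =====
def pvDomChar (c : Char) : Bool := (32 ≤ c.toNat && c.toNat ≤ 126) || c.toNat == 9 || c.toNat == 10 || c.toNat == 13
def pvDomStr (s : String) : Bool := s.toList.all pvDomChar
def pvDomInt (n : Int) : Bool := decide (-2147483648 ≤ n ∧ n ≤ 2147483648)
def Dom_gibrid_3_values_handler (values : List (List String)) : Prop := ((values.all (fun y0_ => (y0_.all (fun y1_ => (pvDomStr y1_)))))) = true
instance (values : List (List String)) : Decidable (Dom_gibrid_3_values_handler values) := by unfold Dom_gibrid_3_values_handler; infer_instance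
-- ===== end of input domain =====

-- B indexes `second` once by 3-char prefix/suffix into two dicts and, per word of `first`,
-- merges the two match lists with two pointers, with a set mirror of `union` for the dedup
-- membership test, instead of A's scan of all of `second` (with a linear `in union` test)
-- for every word of `first`.  Objective: faster.

-- shared string helpers (exact Python: a + '-' + b, s[0:3], s[-3:])
def pvCat (a b : String) : String := String.ofList (a.toList ++ '-' :: b.toList)
def pvPref3 (s : String) : String := PySem.Str.slice s (some 0) (some 3)
def pvSuf3 (s : String) : String := PySem.Str.slice s (some (-3)) none

-- ===== PORT A =====
-- body of A's inner `for j in second` loop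
def pvStepA (i : String) (union : List String) (j : String) : List String :=
  if PySem.Str.len i < 4 ∧ PySem.Str.len j < 4 then union
  else
    let union :=
      if pvSuf3 i = pvPref3 j then
        (if pvCat j i ∈ union then union else union ++ [pvCat i j])
      else union
    if pvPref3 i = pvSuf3 j then
      (if pvCat i j ∈ union then union else union ++ [pvCat j i])
    else union

def gibrid_3_values_handler (values : List (List String)) : List String :=
  match PySem.List.pyGet? values 0, PySem.List.pyGet? values 1 with
  | some first, some second =>
      first.foldl (fun union i => second.foldl (pvStepA i) union) []
  | _, _ => []   -- unreachable under Pre_ (values[0] / values[1] would raise IndexError)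

-- ===== PORT B =====
-- enumerate(second), starting index k
def pvEnumFrom (k : Nat) : List String → List (Nat × String)
  | [] => []
  | x :: xs => (k, x) :: pvEnumFrom (k + 1) xs

-- one action of the merged while-loop (key = string whose membership is tested,
-- val = string appended); state = (union, seen), seen the set mirror of union
def pvStepB (i j key val : String) (st : List String × PySem.Set String) :
    List String × PySem.Set String :=
  if PySem.Str.len i < 4 ∧ PySem.Str.len j < 4 then st
  else if key ∈ st.2 then st
  else (st.1 ++ [val], PySem.Set.add st.2 val)

-- two-pointer merge of the two match lists in `second`'s order (prefix match first on ties)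
def pvMerge (i : String) :
    List (Nat × String) → List (Nat × String) →
    List String × PySem.Set String → List String × PySem.Set String
  | [], [], st => st
  | (_, j) :: t1, [], st => pvMerge i t1 [] (pvStepB i j (pvCat j i) (pvCat i j) st)
  | [], (_, j) :: t2, st => pvMerge i [] t2 (pvStepB i j (pvCat i j) (pvCat j i) st)
  | (n1, j1) :: t1, (n2, j2) :: t2, st =>
      if n1 ≤ n2 then
        pvMerge i t1 ((n2, j2) :: t2) (pvStepB i j1 (pvCat j1 i) (pvCat i j1) st)
      else
        pvMerge i ((n1, j1) :: t1) t2 (pvStepB i j2 (pvCat i j2) (pvCat j2 i) st)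
  termination_by l1 l2 _ => l1.length + l2.length

def gibrid_3_values_handler_alt (values : List (List String)) : List String :=
  match PySem.List.pyGet? values 0 with
  | none => []   -- unreachable under Pre_
  | some first =>
    match PySem.List.pyGet? values 1 with
    | none => []   -- unreachable under Pre_
    | some second =>
      let enum := pvEnumFrom 0 second
      -- by_pref.setdefault(j[0:3], []).append((idx, j)), i.e. d[k] = d.get(k, []) + [(idx, j)]
      let byPref := enum.foldl (fun d p => PySem.Dict.modify d (pvPref3 p.2) [] (· ++ [p])) PySem.Dict.empty
      let bySuff := enum.foldl (fun d p => PySem.Dict.modify d (pvSuf3 p.2) [] (· ++ [p])) PySem.Dict.empty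
      (first.foldl (fun st i =>
          pvMerge i (PySem.Dict.getD byPref (pvSuf3 i) [])
                    (PySem.Dict.getD bySuff (pvPref3 i) []) st)
        (([] : List String), PySem.Set.empty)).1

-- ===== PRECONDITION & SPEC =====
-- A evaluates values[0] and values[1]: it raises IndexError iff values has fewer than 2 rows.
def Pre_gibrid_3_values_handler (values : List (List String)) : Prop := 2 ≤ values.length
instance (values : List (List String)) : Decidable (Pre_gibrid_3_values_handler values) := by
  unfold Pre_gibrid_3_values_handler; infer_instance
def pvWitness_gibrid_3_values_handler : List (List String) := [["abcd"], ["bcde"]]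
def Spec_gibrid_3_values_handler (values : List (List String)) (out : List String) : Prop := out = gibrid_3_values_handler_alt values
instance (values : List (List String)) (out : List String) : Decidable (Spec_gibrid_3_values_handler values out) := by unfold Spec_gibrid_3_values_handler; infer_instance

-- ===== CLAIM (what is proved, stated in full; the proofs are below) =====
def Claim_equal_gibrid_3_values_handler : Prop := ∀ (values : List (List String)), Dom_gibrid_3_values_handler values → Pre_gibrid_3_values_handler values → Spec_gibrid_3_values_handler values (gibrid_3_values_handler values)

-- ===== LEMMAS AND PROOFS =====

lemma stepB_guard {i j key val : String} {st : List String × PySem.Set String}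
    (hg : PySem.Str.len i < 4 ∧ PySem.Str.len j < 4) : pvStepB i j key val st = st := by
  unfold pvStepB; rw [if_pos hg]

lemma stepB_mem {i j key val : String} {st : List String × PySem.Set String}
    (hg : ¬ (PySem.Str.len i < 4 ∧ PySem.Str.len j < 4)) (hm : key ∈ st.2) :
    pvStepB i j key val st = st := by
  unfold pvStepB; rw [if_neg hg, if_pos hm]

lemma stepB_new {i j key val : String} {st : List String × PySem.Set String}
    (hg : ¬ (PySem.Str.len i < 4 ∧ PySem.Str.len j < 4)) (hm : key ∉ st.2) :
    pvStepB i j key val st = (st.1 ++ [val], PySem.Set.add st.2 val) := by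
  unfold pvStepB; rw [if_neg hg, if_neg hm]

-- the net effect of one element x of `second` on B's state: its (at most two) actions,
-- prefix-match action first
def pvActs (i x : String) (st : List String × PySem.Set String) : List String × PySem.Set String :=
  let st1 := if pvSuf3 i = pvPref3 x then pvStepB i x (pvCat x i) (pvCat i x) st else st
  if pvPref3 i = pvSuf3 x then pvStepB i x (pvCat i x) (pvCat x i) st1 else st1

-- seen mirrors union, and one element's actions compute A's step
lemma pvActs_spec (i x : String) (u : List String) (seen : PySem.Set String)
    (h : ∀ s, s ∈ seen ↔ s ∈ u) :
    (pvActs i x (u, seen)).1 = pvStepA i u x ∧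
      (∀ s, s ∈ (pvActs i x (u, seen)).2 ↔ s ∈ (pvActs i x (u, seen)).1) := by
  unfold pvActs pvStepA
  by_cases hg : PySem.Str.len i < 4 ∧ PySem.Str.len x < 4
  · simp only [stepB_guard hg, ite_self, if_pos hg]
    exact ⟨trivial, h⟩
  · rw [if_neg hg]
    by_cases h1 : pvSuf3 i = pvPref3 x <;> by_cases h2 : pvPref3 i = pvSuf3 x <;>
      simp only [if_pos, h1, h2, ite_false]
    · by_cases hm1 : pvCat x i ∈ u
      · rw [stepB_mem (st := (u, seen)) hg (show pvCat x i ∈ (u, seen).2 from (h _).mpr hm1),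
            if_pos hm1]
        by_cases hm2 : pvCat i x ∈ u
        · rw [stepB_mem (st := (u, seen)) hg (show pvCat i x ∈ (u, seen).2 from (h _).mpr hm2),
              if_pos hm2]
          exact ⟨rfl, h⟩
        · rw [stepB_new (st := (u, seen)) hg (show pvCat i x ∉ (u, seen).2 from fun c => hm2 ((h _).mp c)),
              if_neg hm2]
          refine ⟨rfl, fun s => ?_⟩
          rw [PySem.Set.mem_add]
          simp [h s]
      · rw [stepB_new (st := (u, seen)) hg (show pvCat x i ∉ (u, seen).2 from fun c => hm1 ((h _).mp c)),
            if_neg hm1]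
        rw [stepB_mem (st := (u ++ [pvCat i x], PySem.Set.add seen (pvCat i x))) hg
              (show pvCat i x ∈ (u ++ [pvCat i x], PySem.Set.add seen (pvCat i x)).2 by
                rw [PySem.Set.mem_add]; right; rfl),
            if_pos (show pvCat i x ∈ u ++ [pvCat i x] by simp)]
        refine ⟨rfl, fun s => ?_⟩
        rw [PySem.Set.mem_add]
        simp [h s]
    · by_cases hm1 : pvCat x i ∈ u
      · rw [stepB_mem (st := (u, seen)) hg (show pvCat x i ∈ (u, seen).2 from (h _).mpr hm1),
            if_pos hm1]
        exact ⟨rfl, h⟩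
      · rw [stepB_new (st := (u, seen)) hg (show pvCat x i ∉ (u, seen).2 from fun c => hm1 ((h _).mp c)),
            if_neg hm1]
        refine ⟨rfl, fun s => ?_⟩
        rw [PySem.Set.mem_add]
        simp [h s]
    · by_cases hm2 : pvCat i x ∈ u
      · rw [stepB_mem (st := (u, seen)) hg (show pvCat i x ∈ (u, seen).2 from (h _).mpr hm2),
            if_pos hm2]
        exact ⟨rfl, h⟩
      · rw [stepB_new (st := (u, seen)) hg (show pvCat i x ∉ (u, seen).2 from fun c => hm2 ((h _).mp c)),
            if_neg hm2]
        refine ⟨rfl, fun s => ?_⟩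
        rw [PySem.Set.mem_add]
        simp [h s]
    · exact ⟨trivial, h⟩

-- every index in pvEnumFrom k xs is ≥ k
lemma pvEnumFrom_ge (xs : List String) : ∀ (k : Nat) (p : Nat × String), p ∈ pvEnumFrom k xs → k ≤ p.1 := by
  induction xs with
  | nil => intro k p hp; simp [pvEnumFrom] at hp
  | cons x xs ih =>
      intro k p hp
      simp only [pvEnumFrom, List.mem_cons] at hp
      rcases hp with rfl | hp
      · exact le_refl _
      · exact Nat.le_of_succ_le (ih (k + 1) p hp)

-- the merge takes the head of the right list when every left index is strictly larger
lemma pvMerge_take2 (i : String) (n : Nat) (j : String) (l1 l2 : List (Nat × String))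
    (st : List String × PySem.Set String) (h1 : ∀ p ∈ l1, n < p.1) :
    pvMerge i l1 ((n, j) :: l2) st = pvMerge i l1 l2 (pvStepB i j (pvCat i j) (pvCat j i) st) := by
  cases l1 with
  | nil => simp [pvMerge]
  | cons q t =>
      obtain ⟨m, y⟩ := q
      have hm : n < m := h1 (m, y) (List.mem_cons_self)
      simp [pvMerge, Nat.not_le.mpr hm]

-- the merge takes the head of the left list when every right index is ≥ its index
lemma pvMerge_take1 (i : String) (n : Nat) (j : String) (l1 l2 : List (Nat × String))
    (st : List String × PySem.Set String) (h2 : ∀ p ∈ l2, n ≤ p.1) :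
    pvMerge i ((n, j) :: l1) l2 st = pvMerge i l1 l2 (pvStepB i j (pvCat j i) (pvCat i j) st) := by
  cases l2 with
  | nil => simp [pvMerge]
  | cons q t =>
      obtain ⟨m, y⟩ := q
      have hm : n ≤ m := h2 (m, y) (List.mem_cons_self)
      simp [pvMerge, hm]

-- the merge over the two filtered enumerations computes A's inner loop, and seen keeps mirroring union
lemma pvMerge_inner (i : String) (xs : List String) :
    ∀ (k : Nat) (u : List String) (seen : PySem.Set String),
    (∀ s, s ∈ seen ↔ s ∈ u) →
    (pvMerge i ((pvEnumFrom k xs).filter (fun p => pvPref3 p.2 = pvSuf3 i))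
               ((pvEnumFrom k xs).filter (fun p => pvSuf3 p.2 = pvPref3 i)) (u, seen)).1
        = xs.foldl (pvStepA i) u ∧
    (∀ s, s ∈ (pvMerge i ((pvEnumFrom k xs).filter (fun p => pvPref3 p.2 = pvSuf3 i))
               ((pvEnumFrom k xs).filter (fun p => pvSuf3 p.2 = pvPref3 i)) (u, seen)).2 ↔
          s ∈ (pvMerge i ((pvEnumFrom k xs).filter (fun p => pvPref3 p.2 = pvSuf3 i))
               ((pvEnumFrom k xs).filter (fun p => pvSuf3 p.2 = pvPref3 i)) (u, seen)).1) := by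
  induction xs with
  | nil =>
      intro k u seen h
      simp only [pvEnumFrom, List.filter_nil, List.foldl_nil, pvMerge]
      exact ⟨trivial, h⟩
  | cons x xs ih =>
      intro k u seen h
      have hf1 : ∀ p ∈ (pvEnumFrom (k + 1) xs).filter (fun p => pvPref3 p.2 = pvSuf3 i), k < p.1 :=
        fun p hp => Nat.lt_of_succ_le (pvEnumFrom_ge xs (k + 1) p (List.mem_of_mem_filter hp))
      have hf2 : ∀ p ∈ (pvEnumFrom (k + 1) xs).filter (fun p => pvSuf3 p.2 = pvPref3 i), k ≤ p.1 :=
        fun p hp => Nat.le_of_succ_le (pvEnumFrom_ge xs (k + 1) p (List.mem_of_mem_filter hp))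
      simp only [pvEnumFrom, List.foldl_cons]
      by_cases hc1 : pvPref3 x = pvSuf3 i <;> by_cases hc2 : pvSuf3 x = pvPref3 i <;>
        simp only [List.filter_cons, hc1, hc2, decide_true, decide_false, Bool.false_eq_true,
          ite_true, ite_false]
      · -- both actions present, prefix-match action first (equal indices)
        rw [pvMerge_take1 i k x _ _ (u, seen)
              (by intro p hp
                  simp only [List.mem_cons] at hp
                  rcases hp with rfl | hp
                  · exact le_refl k
                  · exact hf2 p hp),
            pvMerge_take2 i k x _ _ _ hf1]
        have hacts : pvStepB i x (pvCat i x) (pvCat x i) (pvStepB i x (pvCat x i) (pvCat i x) (u, seen))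
            = pvActs i x (u, seen) := by
          unfold pvActs
          rw [if_pos hc1.symm, if_pos hc2.symm]
        rw [hacts]
        obtain ⟨hA, hI⟩ := pvActs_spec i x u seen h
        have := ih (k + 1) (pvActs i x (u, seen)).1 (pvActs i x (u, seen)).2 hI
        rw [Prod.mk.eta] at this
        rw [hA] at this
        exact this
      · rw [pvMerge_take1 i k x _ _ (u, seen) hf2]
        have hacts : pvStepB i x (pvCat x i) (pvCat i x) (u, seen) = pvActs i x (u, seen) := by
          unfold pvActs
          rw [if_pos hc1.symm, if_neg (show ¬ pvPref3 i = pvSuf3 x from fun c => hc2 c.symm)]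
        rw [hacts]
        obtain ⟨hA, hI⟩ := pvActs_spec i x u seen h
        have := ih (k + 1) (pvActs i x (u, seen)).1 (pvActs i x (u, seen)).2 hI
        rw [Prod.mk.eta] at this
        rw [hA] at this
        exact this
      · rw [pvMerge_take2 i k x _ _ (u, seen) hf1]
        have hacts : pvStepB i x (pvCat i x) (pvCat x i) (u, seen) = pvActs i x (u, seen) := by
          unfold pvActs
          rw [if_neg (show ¬ pvSuf3 i = pvPref3 x from fun c => hc1 c.symm), if_pos hc2.symm]
        rw [hacts]
        obtain ⟨hA, hI⟩ := pvActs_spec i x u seen h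
        have := ih (k + 1) (pvActs i x (u, seen)).1 (pvActs i x (u, seen)).2 hI
        rw [Prod.mk.eta] at this
        rw [hA] at this
        exact this
      · have hacts : (u, seen) = pvActs i x (u, seen) := by
          unfold pvActs
          rw [if_neg (show ¬ pvSuf3 i = pvPref3 x from fun c => hc1 c.symm),
              if_neg (show ¬ pvPref3 i = pvSuf3 x from fun c => hc2 c.symm)]
        rw [hacts]
        obtain ⟨hA, hI⟩ := pvActs_spec i x u seen h
        have := ih (k + 1) (pvActs i x (u, seen)).1 (pvActs i x (u, seen)).2 hI
        rw [Prod.mk.eta] at this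
        rw [hA] at this
        exact this

-- the dict built from the enumeration, looked up at c, is the filtered enumeration
lemma pvDict_getD (enum : List (Nat × String)) (key : String → String) (c : String) :
    PySem.Dict.getD (enum.foldl (fun d p => PySem.Dict.modify d (key p.2) [] (· ++ [p])) PySem.Dict.empty) c []
      = enum.filter (fun p => key p.2 = c) := by
  have h := PySem.Dict.getD_foldl_modify_append (l := enum.map (fun p => (key p.2, p)))
    (d := PySem.Dict.empty) (c := c)
  rw [List.foldl_map] at h
  simp only at h
  rw [h, PySem.Dict.getD_empty, List.filter_map, List.map_map]
  have hpred : ((fun (q : String × (Nat × String)) => q.1 == c) ∘ (fun p => (key p.2, p)))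
      = (fun (p : Nat × String) => decide (key p.2 = c)) := by
    funext p
    by_cases hp : key p.2 = c <;> simp [hp]
  rw [hpred]
  have : ((fun (x : String × (Nat × String)) => x.2) ∘ fun (p : Nat × String) => (key p.2, p)) = id := by
    funext p; rfl
  rw [this, List.map_id, List.nil_append]

-- B's outer fold computes A's nested loops
lemma pvOuter (second : List String) (first : List String) :
    ∀ (u : List String) (seen : PySem.Set String), (∀ s, s ∈ seen ↔ s ∈ u) →
    (first.foldl (fun st i =>
        pvMerge i
          (PySem.Dict.getD ((pvEnumFrom 0 second).foldl
              (fun d p => PySem.Dict.modify d (pvPref3 p.2) [] (· ++ [p])) PySem.Dict.empty) (pvSuf3 i) [])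
          (PySem.Dict.getD ((pvEnumFrom 0 second).foldl
              (fun d p => PySem.Dict.modify d (pvSuf3 p.2) [] (· ++ [p])) PySem.Dict.empty) (pvPref3 i) [])
          st) (u, seen)).1
      = first.foldl (fun u i => second.foldl (pvStepA i) u) u := by
  induction first with
  | nil => intro u seen h; simp
  | cons i first ih =>
      intro u seen h
      simp only [List.foldl_cons]
      rw [pvDict_getD (pvEnumFrom 0 second) pvPref3 (pvSuf3 i),
          pvDict_getD (pvEnumFrom 0 second) pvSuf3 (pvPref3 i)]
      obtain ⟨hA, hI⟩ := pvMerge_inner i second 0 u seen h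
      rw [← Prod.mk.eta (p := pvMerge i _ _ (u, seen))]
      rw [ih _ _ hI, hA]

-- ===== VERDICT (by name: the statement is the Claim_ definition above) =====
theorem gibrid_3_values_handler_spec : Claim_equal_gibrid_3_values_handler := by
  intro values _hdom hpre
  unfold Spec_gibrid_3_values_handler
  unfold Pre_gibrid_3_values_handler at hpre
  match values with
  | [] => simp at hpre
  | [a] => simp at hpre
  | a :: b :: t =>
      have h0 : PySem.List.pyGet? (a :: b :: t) (0 : Int) = some a := by
        simp [PySem.List.pyGet?, PySem.List.pyIdx?, if_pos (show (0:Int) ≤ (t.length:Int) + 1 by positivity)]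
      have h1 : PySem.List.pyGet? (a :: b :: t) (1 : Int) = some b := by
        simp [PySem.List.pyGet?, PySem.List.pyIdx?]
      simp only [gibrid_3_values_handler, gibrid_3_values_handler_alt, h0, h1]
      exact (pvOuter b a [] PySem.Set.empty (by intro s; simp [PySem.Set.empty])).symm
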